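-- pv_equiv track=rewrite | github.com/JiexingQi/codalab_spider | text-to-sql/seq2seq/preprocess/transform_utils.py | mul_mul_match_changeOrder
-- ===== SOURCE A (Python) =====
-- import itertools
--
-- def mul_mul_match_changeOrder(t5_toks_list,  question_toks_list):
--     """"match two list of question toks"""
--     t5_index = [i for i in range(0, len(t5_toks_list))]
--     t5_index.reverse()
--     question_index = [i for i in range(0, len(question_toks_list))]
--     question_index.reverse()
--     index_pair = list(itertools.product(t5_index, question_index))
--     for i, j in index_pair:
--         t5_toks = "".join(t5_toks_list[i:])
--         question_toks = "".join(question_toks_list[j:])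
--         if t5_toks == question_toks:
--             return i, j
--     return -1,-1
-- ===== SOURCE B (Python) =====
-- def mul_mul_match_changeOrder(t5_toks_list, question_toks_list):
--     """match two list of question toks"""
--     # map each joined question suffix to the LARGEST j producing it (descending scan, keep first)
--     best = {}
--     suf = ""
--     for j in range(len(question_toks_list) - 1, -1, -1):
--         suf = question_toks_list[j] + suf
--         if suf not in best:
--             best[suf] = j
--     # scan t5 suffixes with i descending, return on first hit
--     tsuf = ""
--     for i in range(len(t5_toks_list) - 1, -1, -1):
--         tsuf = t5_toks_list[i] + tsuf
--         if tsuf in best: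
--             return i, best[tsuf]
--     return -1, -1
-- ===== Notes on version B (the rewrite author's own statement) =====
-- stated objective: faster
-- what changed: replaces the nested scan over all (i,j) index pairs (joining both suffixes for every pair) by one descending pass over question suffixes building a dict from joined suffix to its largest index, then one descending pass over t5 suffixes with incremental concatenation and a single dict lookup each
import Mathlib
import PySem

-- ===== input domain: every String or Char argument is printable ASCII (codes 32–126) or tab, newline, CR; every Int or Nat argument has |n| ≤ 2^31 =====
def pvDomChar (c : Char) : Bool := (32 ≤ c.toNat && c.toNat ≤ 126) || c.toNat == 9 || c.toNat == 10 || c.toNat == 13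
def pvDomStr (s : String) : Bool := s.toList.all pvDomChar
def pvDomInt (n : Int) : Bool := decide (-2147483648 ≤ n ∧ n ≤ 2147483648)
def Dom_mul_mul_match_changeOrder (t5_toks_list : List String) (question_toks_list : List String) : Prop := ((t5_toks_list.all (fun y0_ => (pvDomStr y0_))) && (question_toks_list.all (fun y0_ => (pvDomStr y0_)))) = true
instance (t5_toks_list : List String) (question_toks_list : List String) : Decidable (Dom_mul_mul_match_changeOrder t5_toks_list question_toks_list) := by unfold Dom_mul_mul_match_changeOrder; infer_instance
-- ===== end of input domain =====

-- B replaces A's scan over every reversed index pair (re-joining both suffixes per pair) by one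
-- descending pass building a dict from joined question suffix to its largest index and one
-- descending pass over incrementally built t5 suffixes with a single lookup each (objective: faster).

-- ===== PORT A =====
def mul_mul_match_changeOrder (t5_toks_list : List String) (question_toks_list : List String) : List Int :=
  let t5_index := (PySem.List.pyRange 0 (t5_toks_list.length : Int) 1).reverse
  let question_index := (PySem.List.pyRange 0 (question_toks_list.length : Int) 1).reverse
  let index_pair := t5_index.flatMap (fun i => question_index.map (fun j => (i, j)))
  match index_pair.find? (fun p =>
      PySem.Str.join "" (PySem.List.slice t5_toks_list (some p.1) none) ==
      PySem.Str.join "" (PySem.List.slice question_toks_list (some p.2) none)) with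
  | some (i, j) => [i, j]
  | none => [-1, -1]

-- ===== PORT B =====
-- first loop of Source B: build dict from joined question suffix to its largest index (insert only if absent)
def pvAltBuildLoop (question_toks_list : List String) :
    List Int → String → PySem.Dict String Int → PySem.Dict String Int
  | [], _, best => best
  | j :: rest, suf, best =>
    let suf' := PySem.List.pyGetD question_toks_list j "" ++ suf
    pvAltBuildLoop question_toks_list rest suf'
      (if best.contains suf' then best else best.insert suf' j)

-- second loop of Source B (early return ⇒ structural recursion over the countdown range)
def pvAltFindLoop (t5_toks_list : List String) (best : PySem.Dict String Int) :
    List Int → String → List Int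
  | [], _ => [-1, -1]
  | i :: rest, tsuf =>
    let tsuf' := PySem.List.pyGetD t5_toks_list i "" ++ tsuf
    match best.get? tsuf' with
    | some j => [i, j]
    | none => pvAltFindLoop t5_toks_list best rest tsuf'

def mul_mul_match_changeOrder_alt (t5_toks_list : List String) (question_toks_list : List String) : List Int :=
  let best := pvAltBuildLoop question_toks_list
    (PySem.List.pyRange ((question_toks_list.length : Int) - 1) (-1) (-1)) "" PySem.Dict.empty
  pvAltFindLoop t5_toks_list best
    (PySem.List.pyRange ((t5_toks_list.length : Int) - 1) (-1) (-1)) ""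

-- ===== PRECONDITION & SPEC =====
def Spec_mul_mul_match_changeOrder (t5_toks_list : List String) (question_toks_list : List String) (out : List Int) : Prop := out = mul_mul_match_changeOrder_alt t5_toks_list question_toks_list
instance (t5_toks_list : List String) (question_toks_list : List String) (out : List Int) : Decidable (Spec_mul_mul_match_changeOrder t5_toks_list question_toks_list out) := by unfold Spec_mul_mul_match_changeOrder; infer_instance

-- ===== CLAIM (what is proved, stated in full; the proofs are below) =====
def Claim_equal_mul_mul_match_changeOrder : Prop := ∀ (t5_toks_list : List String) (question_toks_list : List String), Dom_mul_mul_match_changeOrder t5_toks_list question_toks_list → Spec_mul_mul_match_changeOrder t5_toks_list question_toks_list (mul_mul_match_changeOrder t5_toks_list question_toks_list)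

-- ===== LEMMAS AND PROOFS =====

-- joined suffix starting at k, and the descending index list m-1 … 0
def pvSfx (l : List String) (k : Nat) : String := PySem.Str.join "" (l.drop k)
def pvDesc (m : Nat) : List Nat := (List.range m).reverse

-- common reference value both ports are reduced to
def pvCommon (t5 q : List String) : List Int :=
  match (pvDesc t5.length).findSome? (fun i : Nat =>
      ((pvDesc q.length).find? (fun j => pvSfx t5 i == pvSfx q j)).map
        (fun j : Nat => ((i : Int), (j : Int)))) with
  | some (i, j) => [i, j]
  | none => [-1, -1]

theorem pvJoin_cons (x : String) (l : List String) :
    PySem.Str.join "" (x :: l) = x ++ PySem.Str.join "" l := by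
  rw [← String.toList_inj]
  simp only [PySem.Str.toList_join, String.toList_append, List.map_cons]
  cases l <;> simp [PySem.Chars.join, List.intercalate]

theorem pvSfx_cons (q : List String) (c : Nat) (hc : c < q.length) :
    pvSfx q c = q.getD c "" ++ pvSfx q (c + 1) := by
  unfold pvSfx
  rw [List.drop_eq_getElem_cons hc, pvJoin_cons, List.getD_eq_getElem _ _ hc]

theorem pvSfx_len (q : List String) : pvSfx q q.length = "" := by
  unfold pvSfx
  rw [List.drop_length, ← String.toList_inj]
  simp [PySem.Str.toList_join, PySem.Chars.join, List.intercalate]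

theorem pvDesc_succ (n : Nat) : pvDesc (n + 1) = n :: pvDesc n := by
  simp [pvDesc, List.range_succ]

theorem pvRange_countdown (m : Nat) :
    PySem.List.pyRange ((m : Int) - 1) (-1) (-1) = (pvDesc m).map (fun k : Nat => (k : Int)) := by
  induction m with
  | zero => rw [PySem.List.pyRange_neg_one_eq_nil (by norm_num)]; simp [pvDesc]
  | succ m ih =>
    have h1 : ((m + 1 : Nat) : Int) - 1 = (m : Int) := by push_cast; ring
    rw [h1, PySem.List.pyRange_neg_one_cons (by omega), ih, pvDesc_succ, List.map_cons]

theorem pvRange_up_reverse (m : Nat) :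
    (PySem.List.pyRange 0 (m : Int) 1).reverse = (pvDesc m).map (fun k : Nat => (k : Int)) := by
  rw [PySem.List.pyRange_zero_nat, ← List.map_reverse]
  rfl

theorem pvFind?_head (i : Int) (ys : List Nat) (p : Int × Int → Bool) :
    ((ys.map (fun k : Nat => (k : Int))).map (fun j => (i, j))).find? p
      = (ys.find? (fun j : Nat => p (i, (j : Int)))).map (fun j : Nat => (i, (j : Int))) := by
  induction ys with
  | nil => rfl
  | cons y ys ih =>
    simp only [List.map_cons]
    by_cases h : p (i, (y : Int)) = true
    · rw [List.find?_cons_of_pos h,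
        List.find?_cons_of_pos (p := fun j : Nat => p (i, (j : Int))) (by simpa using h)]
      rfl
    · rw [List.find?_cons_of_neg (by simpa using h),
        List.find?_cons_of_neg (p := fun j : Nat => p (i, (j : Int))) (by simpa using h), ih]

theorem pvFind?_pairs (xs ys : List Nat) (p : Int × Int → Bool) :
    ((xs.map (fun k : Nat => (k : Int))).flatMap
        (fun i => (ys.map (fun k : Nat => (k : Int))).map (fun j => (i, j)))).find? p
      = xs.findSome? (fun i : Nat =>
          (ys.find? (fun j : Nat => p ((i : Int), (j : Int)))).map (fun j : Nat => ((i : Int), (j : Int)))) := by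
  induction xs with
  | nil => rfl
  | cons i xs ih =>
    rw [List.map_cons, List.flatMap_cons, List.find?_append, ih, List.findSome?_cons, pvFind?_head]
    cases h : ys.find? (fun j : Nat => p ((i : Int), (j : Int))) with
    | none => simp
    | some j => simp

theorem pvA_eq_common (t5 q : List String) :
    mul_mul_match_changeOrder t5 q = pvCommon t5 q := by
  simp only [mul_mul_match_changeOrder]
  rw [pvRange_up_reverse, pvRange_up_reverse, pvFind?_pairs]
  simp only [PySem.List.slice_from_natCast]
  simp only [pvCommon, pvSfx]

theorem pvBuild_spec (q : List String) (c : Nat) (hc : c ≤ q.length)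
    (d : PySem.Dict String Int) (s : String) :
    (pvAltBuildLoop q ((pvDesc c).map (fun k : Nat => (k : Int))) (pvSfx q c) d).get? s
      = (d.get? s).or
          (((pvDesc c).find? (fun j => pvSfx q j == s)).map (fun j : Nat => ((j : Int)))) := by
  induction c generalizing d with
  | zero => simp [pvDesc, pvAltBuildLoop]
  | succ c ih =>
    have hlt : c < q.length := hc
    have hsufE : q[c]?.getD "" ++ pvSfx q (c + 1) = pvSfx q c := by
      rw [← List.getD_eq_getElem?_getD]
      exact (pvSfx_cons q c hlt).symm
    rw [pvDesc_succ, List.map_cons]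
    simp only [pvAltBuildLoop, PySem.List.pyGetD_natCast, List.getD_eq_getElem?_getD, hsufE]
    rw [ih (Nat.le_of_lt hlt)]
    by_cases hcont : d.contains (pvSfx q c) = true
    · rw [if_pos hcont]
      by_cases hs : pvSfx q c = s
      · have hcsome : (d.get? s).isSome := by
          rw [← PySem.Dict.contains_eq_isSome_get?]; exact hs ▸ hcont
        obtain ⟨v, hv⟩ := Option.isSome_iff_exists.mp hcsome
        simp [hv, hs]
      · rw [List.find?_cons_of_neg (by simp [hs])]
    · rw [if_neg hcont]
      have hnone : d.get? (pvSfx q c) = none :=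
        (PySem.Dict.get?_eq_none_iff_contains d _).mpr (by simpa using hcont)
      by_cases hs : pvSfx q c = s
      · subst hs
        rw [PySem.Dict.get?_insert, if_pos rfl, hnone, List.find?_cons_of_pos (by simp)]
        rfl
      · rw [PySem.Dict.get?_insert, if_neg (fun hh => hs (Eq.symm hh)),
          List.find?_cons_of_neg (by simp [hs])]

theorem pvFindLoop_spec (t5 : List String) (best : PySem.Dict String Int) (c : Nat)
    (hc : c ≤ t5.length) :
    pvAltFindLoop t5 best ((pvDesc c).map (fun k : Nat => (k : Int))) (pvSfx t5 c)
      = match (pvDesc c).findSome? (fun i : Nat =>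
            (best.get? (pvSfx t5 i)).map (fun j : Int => ((i : Int), j))) with
        | some (i, j) => [i, j]
        | none => [-1, -1] := by
  induction c with
  | zero => rfl
  | succ c ih =>
    have hlt : c < t5.length := hc
    have hsufE : t5[c]?.getD "" ++ pvSfx t5 (c + 1) = pvSfx t5 c := by
      rw [← List.getD_eq_getElem?_getD]
      exact (pvSfx_cons t5 c hlt).symm
    rw [pvDesc_succ, List.map_cons]
    simp only [pvAltFindLoop, PySem.List.pyGetD_natCast, List.getD_eq_getElem?_getD, hsufE,
      List.findSome?_cons]
    cases h : best.get? (pvSfx t5 c) with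
    | none => exact ih (Nat.le_of_lt hlt)
    | some j => rfl

theorem pvB_eq_common (t5 q : List String) :
    mul_mul_match_changeOrder_alt t5 q = pvCommon t5 q := by
  have hbest : ∀ s : String,
      (pvAltBuildLoop q ((pvDesc q.length).map (fun k : Nat => (k : Int))) "" PySem.Dict.empty).get? s
        = ((pvDesc q.length).find? (fun j => pvSfx q j == s)).map (fun j : Nat => ((j : Int))) := by
    intro s
    have h := pvBuild_spec q q.length le_rfl PySem.Dict.empty s
    rw [pvSfx_len] at h
    rw [h, PySem.Dict.get?_empty, Option.none_or]
  have hfind := pvFindLoop_spec t5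
    (pvAltBuildLoop q ((pvDesc q.length).map (fun k : Nat => (k : Int))) "" PySem.Dict.empty)
    t5.length le_rfl
  rw [pvSfx_len] at hfind
  simp only [mul_mul_match_changeOrder_alt]
  rw [pvRange_countdown q.length, pvRange_countdown t5.length, hfind]
  simp only [hbest]
  have hfun : (fun i : Nat =>
        Option.map (fun j : Int => ((i : Int), j))
          (Option.map (fun j : Nat => ((j : Int)))
            ((pvDesc q.length).find? (fun j => pvSfx q j == pvSfx t5 i))))
      = (fun i : Nat =>
        ((pvDesc q.length).find? (fun j => pvSfx t5 i == pvSfx q j)).map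
          (fun j : Nat => ((i : Int), (j : Int)))) := by
    funext i
    have hcomm : (fun j => pvSfx q j == pvSfx t5 i) = (fun j => pvSfx t5 i == pvSfx q j) := by
      funext j
      by_cases h : pvSfx t5 i = pvSfx q j
      · simp [h]
      · simp [h, Ne.symm h]
    rw [hcomm, Option.map_map]
    rfl
  rw [hfun]
  rfl

-- ===== VERDICT (by name: the statement is the Claim_ definition above) =====
theorem mul_mul_match_changeOrder_spec : Claim_equal_mul_mul_match_changeOrder := by
  intro t5 q _
  unfold Spec_mul_mul_match_changeOrder
  rw [pvA_eq_common, pvB_eq_common]
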